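-- pv_equiv track=rewrite | github.com/bnbbbb/Algotithm | 백준/Silver/10610. 30/30.py | convert_thirty
-- ===== SOURCE A (Python) =====
-- def convert_thirty(n):
--     if '0' not in n:
--         return -1
--
--     digit_count = [0] * 10
--     total = 0
--
--     for digit in n:
--         digit = int(digit)
--         digit_count[digit] += 1
--         total += digit
--
--     if total % 3 != 0:
--         return -1
--
--     result = ''
--     for i in range(9, -1, -1):
--         result += str(i) * digit_count[i]
--
--     return int(result)
-- ===== SOURCE B (Python) =====
-- def convert_thirty(n):
--     if '0' not in n:
--         return -1
--     if sum(int(d) for d in n) % 3 != 0: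
--         return -1
--     return int(''.join(sorted(n, reverse=True)))
-- ===== Notes on version B (the rewrite author's own statement) =====
-- stated objective: idiomatic
-- what changed: Replaces the 10-bucket counting table and the descending bucket-concatenation loop by sorting the digit characters in reverse with the library sort and converting the joined string once.
import Mathlib
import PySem

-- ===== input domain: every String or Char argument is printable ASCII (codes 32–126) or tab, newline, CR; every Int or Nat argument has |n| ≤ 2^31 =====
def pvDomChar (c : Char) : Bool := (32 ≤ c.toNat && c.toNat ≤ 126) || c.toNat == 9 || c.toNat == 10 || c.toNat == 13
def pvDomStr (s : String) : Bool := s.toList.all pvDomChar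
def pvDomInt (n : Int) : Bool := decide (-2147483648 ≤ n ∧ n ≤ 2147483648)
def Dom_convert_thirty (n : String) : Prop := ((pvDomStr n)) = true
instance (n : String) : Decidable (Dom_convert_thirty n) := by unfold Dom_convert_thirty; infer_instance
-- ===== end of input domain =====

-- B replaces A's 10-bucket counting table and descending bucket-concatenation loop by a reverse library sort of the digit characters (idiomatic; same results, not faster).


-- ===== PORT A =====
def convert_thirty (n : String) : Int :=
  let cs := n.toList
  if '0' ∉ cs then -1          -- '0' not in n: a one-character substring test = character membership (exact)
  else
    -- for digit in n: digit = int(digit); digit_count[digit] += 1; total += digit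
    -- (int(digit) raises ValueError on a non-digit character: excluded by Pre_)
    let st := cs.foldl (fun (p : List Int × Int) digit =>
        (PySem.List.pySetD p.1 ((PySem.Int.ofChars? [digit]).getD 0)
            (PySem.List.pyGetD p.1 ((PySem.Int.ofChars? [digit]).getD 0) 0 + 1),
         p.2 + (PySem.Int.ofChars? [digit]).getD 0))
      (List.replicate 10 0, 0)
    if PySem.Int.mod st.2 3 ≠ 0 then -1
    else
      -- result = ''; for i in range(9, -1, -1): result += str(i) * digit_count[i]
      let result := (PySem.List.pyRange 9 (-1) (-1)).foldl
        (fun acc i => acc ++ PySem.List.pyRepeat (PySem.Int.toStr i).toList (PySem.List.pyGetD st.1 i 0)) []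
      (PySem.Int.ofChars? result).getD 0   -- int(result): under Pre_ result is a non-empty digit string

-- ===== PORT B =====
def convert_thirty_alt (n : String) : Int :=
  let cs := n.toList
  if '0' ∉ cs then -1
  else if PySem.Int.mod ((cs.map (fun digit => (PySem.Int.ofChars? [digit]).getD 0)).sum) 3 ≠ 0 then -1
  else (PySem.Int.ofChars? (PySem.List.sorted cs (fun c => c) true)).getD 0

-- ===== PRECONDITION & SPEC =====
-- Pre_ excludes exactly the inputs on which both Pythons raise ValueError at int():
-- strings that contain the zero digit together with some non-digit character.
def Pre_convert_thirty (n : String) : Prop :=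
  '0' ∈ n.toList → n.toList.all PySem.Chars.isdigit = true
instance (n : String) : Decidable (Pre_convert_thirty n) := by unfold Pre_convert_thirty; infer_instance
def pvWitness_convert_thirty : String := "30"

def Spec_convert_thirty (n : String) (out : Int) : Prop := out = convert_thirty_alt n
instance (n : String) (out : Int) : Decidable (Spec_convert_thirty n out) := by unfold Spec_convert_thirty; infer_instance

-- ===== CLAIM (what is proved, stated in full; the proofs are below) =====
def Claim_equal_convert_thirty : Prop := ∀ (n : String), Dom_convert_thirty n → Pre_convert_thirty n → Spec_convert_thirty n (convert_thirty n)

-- ===== LEMMAS AND PROOFS =====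

-- each digit character c denotes a value k < 10, with c = chr(48+k) and int(c) = k
theorem digit_val (c : Char) (h : PySem.Chars.isdigit c = true) :
    ∃ k : Nat, k < 10 ∧ c = Char.ofNat (48 + k) ∧ PySem.Int.ofChars? [c] = some (k : Int) := by
  have hb : 48 ≤ c.toNat ∧ c.toNat ≤ 57 := by
    simp only [PySem.Chars.isdigit, Bool.and_eq_true, decide_eq_true_eq, Char.le_def,
      UInt32.le_iff_toNat_le] at h
    exact h
  refine ⟨c.toNat - 48, by omega, ?_, ?_⟩
  · rw [show 48 + (c.toNat - 48) = c.toNat by omega, Char.ofNat_toNat]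
  · have hc : c = Char.ofNat (48 + (c.toNat - 48)) := by
      rw [show 48 + (c.toNat - 48) = c.toNat by omega, Char.ofNat_toNat]
    set k := c.toNat - 48 with hk
    have hk10 : k < 10 := by omega
    rw [hc]
    interval_cases k <;> decide

theorem digit_char_inj (k k' : Nat) (hk : k < 10) (hk' : k' < 10) :
    (Char.ofNat (48 + k) = Char.ofNat (48 + k')) ↔ k = k' := by
  interval_cases k <;> interval_cases k' <;> decide

-- invariant of A's counting loop: bucket k holds the count of the character chr(48+k),
-- and the running total is the sum of the digit values
theorem loopA (cs : List Char) (hd : ∀ c ∈ cs, PySem.Chars.isdigit c = true) :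
    ∀ (dc : List Int) (t : Int), dc.length = 10 →
    ((cs.foldl (fun (p : List Int × Int) digit =>
        (PySem.List.pySetD p.1 ((PySem.Int.ofChars? [digit]).getD 0)
            (PySem.List.pyGetD p.1 ((PySem.Int.ofChars? [digit]).getD 0) 0 + 1),
         p.2 + (PySem.Int.ofChars? [digit]).getD 0)) (dc, t)).1.length = 10 ∧
     (∀ k : Nat, k < 10 →
       (cs.foldl (fun (p : List Int × Int) digit =>
        (PySem.List.pySetD p.1 ((PySem.Int.ofChars? [digit]).getD 0)
            (PySem.List.pyGetD p.1 ((PySem.Int.ofChars? [digit]).getD 0) 0 + 1),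
         p.2 + (PySem.Int.ofChars? [digit]).getD 0)) (dc, t)).1.getD k 0
         = dc.getD k 0 + (cs.count (Char.ofNat (48 + k)) : Int)) ∧
     (cs.foldl (fun (p : List Int × Int) digit =>
        (PySem.List.pySetD p.1 ((PySem.Int.ofChars? [digit]).getD 0)
            (PySem.List.pyGetD p.1 ((PySem.Int.ofChars? [digit]).getD 0) 0 + 1),
         p.2 + (PySem.Int.ofChars? [digit]).getD 0)) (dc, t)).2
       = t + (cs.map (fun digit => (PySem.Int.ofChars? [digit]).getD 0)).sum) := by
  induction cs with
  | nil => intro dc t hlen; simp [hlen]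
  | cons c cs ih =>
    intro dc t hlen
    obtain ⟨k', hk', hck, hof⟩ := digit_val c (hd c (List.mem_cons_self))
    have hd' : ∀ x ∈ cs, PySem.Chars.isdigit x = true := fun x hx => hd x (List.mem_cons_of_mem _ hx)
    simp only [List.foldl_cons, hof, Option.getD_some, PySem.List.pySetD_natCast,
      PySem.List.pyGetD_natCast]
    have hlen' : (dc.set k' (dc.getD k' 0 + 1)).length = 10 := by simp [hlen]
    obtain ⟨ih1, ih2, ih3⟩ := ih hd' (dc.set k' (dc.getD k' 0 + 1)) (t + (k' : Int)) hlen'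
    refine ⟨ih1, ?_, ?_⟩
    · intro k hk
      rw [ih2 k hk]
      have hset : (dc.set k' (dc.getD k' 0 + 1)).getD k 0
          = if k' = k then dc.getD k' 0 + 1 else dc.getD k 0 := by
        simp only [List.getD_eq_getElem?_getD, List.getElem?_set, hlen, hk']
        by_cases hkk : k' = k <;> simp [hkk]
      rw [hset, hck, List.count_cons]
      by_cases hkk : k' = k
      · subst hkk
        rw [if_pos rfl, if_pos (by simp)]
        push_cast; ring
      · rw [if_neg hkk, if_neg (by simp [digit_char_inj k' k hk' hk, hkk])]
        push_cast; ring
    · rw [ih3, List.map_cons, List.sum_cons, hof]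
      simp [add_assoc]

-- concatenating count-many copies of each of a set of distinct characters, over all of them,
-- is a permutation of any list drawn from those characters
theorem perm_flatMap_count (ds : List Char) (hnd : ds.Nodup) :
    ∀ cs : List Char, (∀ c ∈ cs, c ∈ ds) →
    (ds.flatMap (fun d => List.replicate (cs.count d) d)).Perm cs := by
  induction ds with
  | nil =>
    intro cs hall
    cases cs with
    | nil => simp
    | cons c cs => exact absurd (hall c List.mem_cons_self) (by simp)
  | cons d ds ih =>
    intro cs hall
    have hnd' : ds.Nodup := hnd.of_cons
    have hdn : d ∉ ds := (List.nodup_cons.mp hnd).1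
    rw [List.flatMap_cons]
    have hrep : List.replicate (cs.count d) d = cs.filter (fun x => x == d) :=
      (List.filter_beq d).symm
    have hcongr : ds.flatMap (fun d' => List.replicate (cs.count d') d')
        = ds.flatMap (fun d' => List.replicate ((cs.filter (fun x => !(x == d))).count d') d') := by
      apply List.flatMap_congr
      intro d' hd'
      have : (cs.filter (fun x => !(x == d))).count d' = cs.count d' := by
        apply List.count_filter
        simp only [Bool.not_eq_eq_eq_not, Bool.not_true, beq_eq_false_iff_ne, ne_eq]
        intro he; exact hdn (he ▸ hd')
      rw [this]
    have hperm' : (ds.flatMap (fun d' =>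
        List.replicate ((cs.filter (fun x => !(x == d))).count d') d')).Perm
        (cs.filter (fun x => !(x == d))) := by
      apply ih hnd'
      intro c hc
      have hc1 : c ∈ cs := List.mem_of_mem_filter hc
      have hc2 : ¬(c == d) = true := by
        have := List.of_mem_filter hc
        simpa using this
      cases hall c hc1 with
      | head => exact absurd (by simp) hc2
      | tail _ h => exact h
    rw [hrep, hcongr]
    exact (List.Perm.append_left _ hperm').trans (List.filter_append_perm _ cs)

-- a descending arrangement names sorted(cs, reverse=True)
theorem sorted_desc_eq (cs ys : List Char) (hperm : ys.Perm cs)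
    (hpw : ys.Pairwise (fun a b => b ≤ a)) :
    PySem.List.sorted cs (fun c => c) true = ys := by
  apply List.reverse_inj.mp
  apply PySem.List.eq_of_perm_of_pairwise_le_of_injective (key := fun c => c) (fun a b h => h)
  · exact (List.reverse_perm _).trans
      (((PySem.List.sorted_perm cs (fun c => c) true).trans hperm.symm).trans
        (List.reverse_perm _).symm)
  · exact List.pairwise_reverse.mpr (PySem.List.sorted_pairwise_rev cs (fun c => c))
  · exact List.pairwise_reverse.mpr hpw

-- ===== VERDICT (by name: the statement is the Claim_ definition above) =====
theorem convert_thirty_spec : Claim_equal_convert_thirty := by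
  intro n hdom hpre
  unfold Spec_convert_thirty convert_thirty convert_thirty_alt
  by_cases h0 : '0' ∈ n.toList
  · simp only [h0, not_true_eq_false, if_false]
    have hd : ∀ c ∈ n.toList, PySem.Chars.isdigit c = true := List.all_eq_true.mp (hpre h0)
    obtain ⟨hlen10, hcnt, hsum⟩ := loopA n.toList hd (List.replicate 10 0) 0 (by simp)
    rw [hsum, zero_add]
    by_cases hm : PySem.Int.mod ((n.toList.map (fun digit => (PySem.Int.ofChars? [digit]).getD 0)).sum) 3 = 0
    · simp only [hm, ne_eq, not_true_eq_false, if_false]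
      refine congrArg (fun r => (PySem.Int.ofChars? r).getD 0) ?_
      set dcf := (n.toList.foldl (fun (p : List Int × Int) digit =>
          (PySem.List.pySetD p.1 ((PySem.Int.ofChars? [digit]).getD 0)
              (PySem.List.pyGetD p.1 ((PySem.Int.ofChars? [digit]).getD 0) 0 + 1),
           p.2 + (PySem.Int.ofChars? [digit]).getD 0)) (List.replicate 10 0, 0)).1 with hdcf
      have hcnt' : ∀ k : Nat, k < 10 →
          dcf.getD k 0 = ((n.toList.count (Char.ofNat (48 + k)) : Nat) : Int) := by
        intro k hk
        rw [hcnt k hk, List.getD_replicate (0 : Int) hk, zero_add]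
      have h9 : PySem.List.pyRepeat (PySem.Int.toStr (9 : Int)).toList
          (PySem.List.pyGetD dcf (9 : Int) 0) = List.replicate (n.toList.count '9') '9' := by
        have hg := hcnt' 9 (by omega)
        rw [show Char.ofNat (48 + 9) = '9' from by decide] at hg
        rw [show (PySem.Int.toStr (9 : Int)).toList = ['9'] from by decide,
          PySem.List.pyGetD_ofNat' dcf 9 0, hg, PySem.List.pyRepeat_singleton, Int.toNat_natCast]
      have h8 : PySem.List.pyRepeat (PySem.Int.toStr (8 : Int)).toList
          (PySem.List.pyGetD dcf (8 : Int) 0) = List.replicate (n.toList.count '8') '8' := by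
        have hg := hcnt' 8 (by omega)
        rw [show Char.ofNat (48 + 8) = '8' from by decide] at hg
        rw [show (PySem.Int.toStr (8 : Int)).toList = ['8'] from by decide,
          PySem.List.pyGetD_ofNat' dcf 8 0, hg, PySem.List.pyRepeat_singleton, Int.toNat_natCast]
      have h7 : PySem.List.pyRepeat (PySem.Int.toStr (7 : Int)).toList
          (PySem.List.pyGetD dcf (7 : Int) 0) = List.replicate (n.toList.count '7') '7' := by
        have hg := hcnt' 7 (by omega)
        rw [show Char.ofNat (48 + 7) = '7' from by decide] at hg
        rw [show (PySem.Int.toStr (7 : Int)).toList = ['7'] from by decide,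
          PySem.List.pyGetD_ofNat' dcf 7 0, hg, PySem.List.pyRepeat_singleton, Int.toNat_natCast]
      have h6 : PySem.List.pyRepeat (PySem.Int.toStr (6 : Int)).toList
          (PySem.List.pyGetD dcf (6 : Int) 0) = List.replicate (n.toList.count '6') '6' := by
        have hg := hcnt' 6 (by omega)
        rw [show Char.ofNat (48 + 6) = '6' from by decide] at hg
        rw [show (PySem.Int.toStr (6 : Int)).toList = ['6'] from by decide,
          PySem.List.pyGetD_ofNat' dcf 6 0, hg, PySem.List.pyRepeat_singleton, Int.toNat_natCast]
      have h5 : PySem.List.pyRepeat (PySem.Int.toStr (5 : Int)).toList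
          (PySem.List.pyGetD dcf (5 : Int) 0) = List.replicate (n.toList.count '5') '5' := by
        have hg := hcnt' 5 (by omega)
        rw [show Char.ofNat (48 + 5) = '5' from by decide] at hg
        rw [show (PySem.Int.toStr (5 : Int)).toList = ['5'] from by decide,
          PySem.List.pyGetD_ofNat' dcf 5 0, hg, PySem.List.pyRepeat_singleton, Int.toNat_natCast]
      have h4 : PySem.List.pyRepeat (PySem.Int.toStr (4 : Int)).toList
          (PySem.List.pyGetD dcf (4 : Int) 0) = List.replicate (n.toList.count '4') '4' := by
        have hg := hcnt' 4 (by omega)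
        rw [show Char.ofNat (48 + 4) = '4' from by decide] at hg
        rw [show (PySem.Int.toStr (4 : Int)).toList = ['4'] from by decide,
          PySem.List.pyGetD_ofNat' dcf 4 0, hg, PySem.List.pyRepeat_singleton, Int.toNat_natCast]
      have h3 : PySem.List.pyRepeat (PySem.Int.toStr (3 : Int)).toList
          (PySem.List.pyGetD dcf (3 : Int) 0) = List.replicate (n.toList.count '3') '3' := by
        have hg := hcnt' 3 (by omega)
        rw [show Char.ofNat (48 + 3) = '3' from by decide] at hg
        rw [show (PySem.Int.toStr (3 : Int)).toList = ['3'] from by decide,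
          PySem.List.pyGetD_ofNat' dcf 3 0, hg, PySem.List.pyRepeat_singleton, Int.toNat_natCast]
      have h2 : PySem.List.pyRepeat (PySem.Int.toStr (2 : Int)).toList
          (PySem.List.pyGetD dcf (2 : Int) 0) = List.replicate (n.toList.count '2') '2' := by
        have hg := hcnt' 2 (by omega)
        rw [show Char.ofNat (48 + 2) = '2' from by decide] at hg
        rw [show (PySem.Int.toStr (2 : Int)).toList = ['2'] from by decide,
          PySem.List.pyGetD_ofNat' dcf 2 0, hg, PySem.List.pyRepeat_singleton, Int.toNat_natCast]
      have h1 : PySem.List.pyRepeat (PySem.Int.toStr (1 : Int)).toList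
          (PySem.List.pyGetD dcf (1 : Int) 0) = List.replicate (n.toList.count '1') '1' := by
        have hg := hcnt' 1 (by omega)
        rw [show Char.ofNat (48 + 1) = '1' from by decide] at hg
        rw [show (PySem.Int.toStr (1 : Int)).toList = ['1'] from by decide,
          PySem.List.pyGetD_ofNat' dcf 1 0, hg, PySem.List.pyRepeat_singleton, Int.toNat_natCast]
      have h0f : PySem.List.pyRepeat (PySem.Int.toStr (0 : Int)).toList
          (PySem.List.pyGetD dcf (0 : Int) 0) = List.replicate (n.toList.count '0') '0' := by
        have hg := hcnt' 0 (by omega)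
        rw [show Char.ofNat (48 + 0) = '0' from by decide] at hg
        rw [show (PySem.Int.toStr (0 : Int)).toList = ['0'] from by decide,
          PySem.List.pyGetD_ofNat' dcf 0 0, hg, PySem.List.pyRepeat_singleton, Int.toNat_natCast]
      have hall : ∀ c ∈ n.toList, c ∈ (['9','8','7','6','5','4','3','2','1','0'] : List Char) := by
        intro c hc
        obtain ⟨k, hk, hck, -⟩ := digit_val c (hd c hc)
        subst hck
        interval_cases k <;> decide
      have hperm := perm_flatMap_count (['9','8','7','6','5','4','3','2','1','0'] : List Char)
        (by decide) n.toList hall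
      have hpw : ((['9','8','7','6','5','4','3','2','1','0'] : List Char).flatMap
          (fun d => List.replicate (n.toList.count d) d)).Pairwise (fun a b => b ≤ a) := by
        rw [List.pairwise_flatMap]
        refine ⟨fun a _ => ?_, ?_⟩
        · rw [List.pairwise_replicate]; right; exact le_refl a
        · have base : (['9','8','7','6','5','4','3','2','1','0'] : List Char).Pairwise
              (fun a b => b ≤ a) := by decide
          exact base.imp (fun h x hx y hy => by
            rw [List.eq_of_mem_replicate hx, List.eq_of_mem_replicate hy]; exact h)
      have hrange : PySem.List.pyRange 9 (-1) (-1) = ([9,8,7,6,5,4,3,2,1,0] : List Int) := by decide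
      rw [hrange, PySem.List.foldl_append_eq_flatMap, List.nil_append,
        sorted_desc_eq n.toList _ hperm hpw]
      simp only [List.flatMap_cons, List.flatMap_nil, List.append_nil]
      rw [h9, h8, h7, h6, h5, h4, h3, h2, h1, h0f]
    · simp only [hm, ne_eq, not_false_eq_true, if_true]
  · simp [h0]
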